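-- pv_equiv track=rewrite | github.com/3bde1r7man/Othello-AI | helper.py | checkFlipRight
-- ===== SOURCE A (Python) =====
-- def checkFlipRight(Board, x, y, player):
--     count = 0
--     for i in range(y + 1, 8):
--         if Board[x][i] == player:
--             if(count == i - (y + 1) and count != 0):
--                 return True
--             return False
--         elif Board[x][i] != 0 and Board[x][i] != player:
--             count += 1
--     return False
-- ===== SOURCE B (Python) =====
-- def checkFlipRight(Board, x, y, player):
--     cells = [Board[x][i] for i in range(y + 1, 8)]
--     if player not in cells:
--         return False
--     k = cells.index(player)
--     return k > 0 and all(c != 0 and c != player for c in cells[:k])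
-- ===== Notes on version B (the rewrite author's own statement) =====
-- stated objective: alternative
-- what changed: Instead of A's single forward scan carrying an opponent counter and comparing it against the travelled distance, B materialises the segment to the right, locates the FIRST occurrence of the player's disc with list.index, and then verifies that the whole prefix before it is non-empty and consists of opponent discs (locate-then-validate, two staged passes, no counter).
-- outside the precondition, e.g. on checkFlipRight([[5]], 0, -1, 5): A returns False, B raises IndexError
import Mathlib
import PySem

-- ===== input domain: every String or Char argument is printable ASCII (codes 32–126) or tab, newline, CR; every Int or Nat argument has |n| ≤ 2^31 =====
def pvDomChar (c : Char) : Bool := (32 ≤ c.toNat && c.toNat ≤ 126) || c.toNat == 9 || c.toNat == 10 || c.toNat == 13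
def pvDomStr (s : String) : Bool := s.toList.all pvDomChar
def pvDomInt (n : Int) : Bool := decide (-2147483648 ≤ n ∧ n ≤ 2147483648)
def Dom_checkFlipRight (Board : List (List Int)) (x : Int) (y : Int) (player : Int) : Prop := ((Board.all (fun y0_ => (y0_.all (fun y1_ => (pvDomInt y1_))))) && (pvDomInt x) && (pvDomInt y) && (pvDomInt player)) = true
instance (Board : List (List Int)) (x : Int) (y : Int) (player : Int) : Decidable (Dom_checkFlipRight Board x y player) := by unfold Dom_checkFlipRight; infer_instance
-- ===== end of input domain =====

-- B replaces A's counter-carrying forward scan with locate-then-validate: materialise the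
-- rightward segment, find the first occurrence of the player's disc, and check that the
-- prefix before it is a non-empty run of opponent discs (objective: alternative).

-- Board[x][i] (Python indexing, negative wraps; none = IndexError)
def pvCell (Board : List (List Int)) (x i : Int) : Option Int :=
  (PySem.List.pyGet? Board x).bind (fun r => PySem.List.pyGet? r i)

-- ===== PORT A =====
-- A's for-loop over range(y+1, 8) carrying `count`; element access via pvCell (none is
-- unreachable under Pre_).
def checkFlipRightLoopA (Board : List (List Int)) (x y player : Int) :
    List Int → Int → Bool
  | [], _ => false
  | i :: rest, count =>
    match pvCell Board x i with
    | none => false   -- Python raises IndexError here; excluded by Pre_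
    | some c =>
      if c = player then
        decide (count = i - (y + 1) ∧ count ≠ 0)
      else if c ≠ 0 ∧ c ≠ player then
        checkFlipRightLoopA Board x y player rest (count + 1)
      else
        checkFlipRightLoopA Board x y player rest count

def checkFlipRight (Board : List (List Int)) (x : Int) (y : Int) (player : Int) : Bool :=
  checkFlipRightLoopA Board x y player (PySem.List.pyRange (y + 1) 8 1) 0

-- ===== PORT B =====
-- cells = [Board[x][i] for i in range(y+1, 8)]; then: not-in test, first index of player,
-- and an all() over the prefix cells[:k].
def checkFlipRight_alt (Board : List (List Int)) (x : Int) (y : Int) (player : Int) : Bool :=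
  match (PySem.List.pyRange (y + 1) 8 1).mapM (fun i => pvCell Board x i) with
  | none => false   -- the comprehension raises IndexError; excluded by Pre_
  | some cells =>
    if player ∈ cells then
      match PySem.List.index? cells player with
      | some k =>
          decide (0 < k) &&
            (PySem.List.slice cells none (some (k : Int))).all
              (fun c => decide (c ≠ 0) && decide (c ≠ player))
      | none => false
    else false

-- ===== PRECONDITION & SPEC =====
-- Pre_ excludes inputs on which the scan over columns y+1..7 can run off the board and raise
-- IndexError (in A's loop, or in B's eager comprehension): when y < 7 it requires x to index
-- a row of length ≥ 8 with y+1 ≥ -len(row); this also excludes some inputs where A happens to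
-- return early before the bad access while B's comprehension raises.
def Pre_checkFlipRight (Board : List (List Int)) (x : Int) (y : Int) (player : Int) : Prop :=
  7 ≤ y ∨
    (PySem.List.pyGet? Board x).any
      (fun row => decide (8 ≤ row.length) && decide (-(row.length : Int) ≤ y + 1)) = true
instance (Board : List (List Int)) (x : Int) (y : Int) (player : Int) : Decidable (Pre_checkFlipRight Board x y player) := by unfold Pre_checkFlipRight; infer_instance

def pvWitness_checkFlipRight : List (List Int) × Int × Int × Int :=
  ([[0, 2, 2, 1, 0, 0, 0, 0]], 0, 0, 1)

def Spec_checkFlipRight (Board : List (List Int)) (x : Int) (y : Int) (player : Int) (out : Bool) : Prop := out = checkFlipRight_alt Board x y player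
instance (Board : List (List Int)) (x : Int) (y : Int) (player : Int) (out : Bool) : Decidable (Spec_checkFlipRight Board x y player out) := by unfold Spec_checkFlipRight; infer_instance

-- ===== CLAIM =====
def Claim_equal_checkFlipRight : Prop := ∀ (Board : List (List Int)) (x : Int) (y : Int) (player : Int), Dom_checkFlipRight Board x y player → Pre_checkFlipRight Board x y player → Spec_checkFlipRight Board x y player (checkFlipRight Board x y player)

-- ===== LEMMAS AND PROOFS =====

-- A's loop, abstracted to the list of cell VALUES; d is the travelled distance i - (y+1).
def loopList (player : Int) : List Int → Int → Int → Bool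
  | [], _, _ => false
  | c :: rest, d, count =>
    if c = player then decide (count = d ∧ count ≠ 0)
    else if c ≠ 0 ∧ c ≠ player then loopList player rest (d + 1) (count + 1)
    else loopList player rest (d + 1) count

-- once the count has fallen behind the distance, the loop can only return false
theorem loopList_dead (player : Int) :
    ∀ (cells : List Int) (d count : Int), count < d → loopList player cells d count = false := by
  intro cells
  induction cells with
  | nil => intro d count _; rfl
  | cons c rest ih =>
    intro d count h
    simp only [loopList]
    split_ifs with h1 h2
    · simp; omega
    · exact ih (d + 1) (count + 1) (by omega)
    · exact ih (d + 1) count (by omega)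

-- while count keeps pace with the distance, the loop computes locate-then-validate
theorem loopList_live (player : Int) :
    ∀ (cells : List Int) (d : Int), 0 ≤ d →
      loopList player cells d d =
        (match PySem.List.index? cells player with
         | some k => decide (d + (k : Int) ≠ 0) && (cells.take k).all (fun c => decide (c ≠ 0))
         | none => false) := by
  intro cells
  induction cells with
  | nil => intro d _; simp [loopList, PySem.List.index?]
  | cons c rest ih =>
    intro d hd
    by_cases h1 : c = player
    · subst h1
      rw [PySem.List.index?_cons_self]
      simp [loopList]
    · rw [PySem.List.index?_cons_of_ne rest h1]
      by_cases h2 : c ≠ 0 ∧ c ≠ player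
      · have hstep : loopList player (c :: rest) d d = loopList player rest (d + 1) (d + 1) := by
          simp only [loopList, if_neg h1, if_pos h2]
        rw [hstep, ih (d + 1) (by omega)]
        cases hk : PySem.List.index? rest player with
        | none => simp
        | some k =>
          simp only [Option.map_some, List.take_succ_cons, List.all_cons, h2.1,
            ne_eq, not_false_iff, decide_true, Bool.true_and]
          have : d + 1 + (k : Int) = d + ((k + 1 : Nat) : Int) := by push_cast; ring
          rw [this]
      · have hc0 : c = 0 := by by_contra h; exact h2 ⟨h, h1⟩
        have hstep : loopList player (c :: rest) d d = loopList player rest (d + 1) d := by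
          simp only [loopList, if_neg h1, if_neg h2]
        rw [hstep, loopList_dead player rest (d + 1) d (by omega)]
        cases hk : PySem.List.index? rest player with
        | none => simp
        | some k => simp [hc0]

-- helper: a mapM over Option succeeds when every element maps to some
theorem mapM_isSome {α β : Type} (f : α → Option β) :
    ∀ (l : List α), (∀ a ∈ l, (f a).isSome) → ∃ r, l.mapM f = some r := by
  intro l
  induction l with
  | nil => intro _; exact ⟨[], rfl⟩
  | cons a rest ih =>
    intro h
    obtain ⟨b, hb⟩ := Option.isSome_iff_exists.mp (h a (List.mem_cons_self))
    obtain ⟨r, hr⟩ := ih (fun a' ha' => h a' (List.mem_cons_of_mem _ ha'))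
    exact ⟨b :: r, by simp [List.mapM_cons, hb, hr]⟩

-- bridge: A's index loop equals loopList on the materialised cells
theorem loopA_eq_loopList (Board : List (List Int)) (x y player : Int) :
    ∀ (j : Int) (cells : List Int) (count : Int),
      (PySem.List.pyRange j 8 1).mapM (fun i => pvCell Board x i) = some cells →
      checkFlipRightLoopA Board x y player (PySem.List.pyRange j 8 1) count =
        loopList player cells (j - (y + 1)) count := by
  intro j
  induction hn : (8 - j).toNat using Nat.strong_induction_on generalizing j with
  | _ n ih =>
    intro cells count hmap
    by_cases hj : j < 8
    · rw [PySem.List.pyRange_one_cons hj] at hmap ⊢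
      simp only [List.mapM_cons] at hmap
      cases hc : pvCell Board x j with
      | none => rw [hc] at hmap; simp [Option.bind] at hmap
      | some c =>
        cases hcs : (PySem.List.pyRange (j + 1) 8 1).mapM (fun i => pvCell Board x i) with
        | none => rw [hc, hcs] at hmap; simp [Option.bind] at hmap
        | some cs =>
          rw [hc, hcs] at hmap
          simp [Option.bind, Option.pure_def] at hmap
          subst hmap
          simp only [checkFlipRightLoopA, hc, loopList]
          split_ifs with h1 h2
          · rfl
          · rw [ih ((8 - (j + 1)).toNat) (by omega) (j + 1) (by omega) cs (count + 1) hcs]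
            rw [show j + 1 - (y + 1) = j - (y + 1) + 1 from by omega]
          · rw [ih ((8 - (j + 1)).toNat) (by omega) (j + 1) (by omega) cs count hcs]
            rw [show j + 1 - (y + 1) = j - (y + 1) + 1 from by omega]
    · rw [show PySem.List.pyRange j 8 1 = [] from PySem.List.pyRange_one_eq_nil (by omega)] at hmap ⊢
      simp only [List.mapM_nil, Option.pure_def, Option.some.injEq] at hmap
      subst hmap
      rfl

-- helper: an && - all over a list whose elements all satisfy the second conjunct
theorem all_and_of_forall {l : List Int} {p q : Int → Bool} (h : ∀ c ∈ l, q c = true) :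
    l.all (fun c => p c && q c) = l.all p := by
  induction l with
  | nil => rfl
  | cons c rest ih =>
    simp only [List.all_cons, h c List.mem_cons_self, Bool.and_true,
      ih (fun c' hc' => h c' (List.mem_cons_of_mem _ hc'))]

-- B's branch structure equals the locate-then-validate view used by loopList_live
theorem alt_view (player : Int) (cells : List Int) :
    (if player ∈ cells then
      match PySem.List.index? cells player with
      | some k =>
          decide (0 < k) &&
            (PySem.List.slice cells none (some (k : Int))).all
              (fun c => decide (c ≠ 0) && decide (c ≠ player))
      | none => false
     else false) =
    (match PySem.List.index? cells player with
     | some k => decide ((0 : Int) + (k : Int) ≠ 0) && (cells.take k).all (fun c => decide (c ≠ 0))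
     | none => false) := by
  by_cases hmem : player ∈ cells
  · obtain ⟨k, hk⟩ := Option.isSome_iff_exists.mp ((PySem.List.index?_isSome_iff cells player).mpr hmem)
    rw [if_pos hmem, hk]
    show (decide (0 < k) &&
          (PySem.List.slice cells none (some (k : Int))).all
            (fun c => decide (c ≠ 0) && decide (c ≠ player))) =
        (decide ((0 : Int) + (k : Int) ≠ 0) && (cells.take k).all (fun c => decide (c ≠ 0)))
    rw [PySem.List.slice_to_natCast]
    obtain ⟨hklt, hget, hbefore⟩ := PySem.List.getElem_of_index?_eq_some hk
    have hne : ∀ c ∈ cells.take k, decide (c ≠ player) = true := by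
      intro c hc
      obtain ⟨j, hj, hjc⟩ := List.mem_iff_getElem.mp hc
      have hjk : j < k := by have := hj; simp [List.length_take] at this; omega
      rw [List.getElem_take] at hjc
      simp only [decide_eq_true_eq]
      rw [← hjc]
      exact hbefore j hjk
    rw [all_and_of_forall hne]
    have : decide (0 < k) = decide ((0 : Int) + (k : Int) ≠ 0) := by
      rcases Nat.eq_zero_or_pos k with h | h <;> simp [h] <;> omega
    rw [this]
  · rw [if_neg hmem, (PySem.List.index?_eq_none_iff cells player).mpr hmem]

-- ===== VERDICT =====
theorem checkFlipRight_spec : Claim_equal_checkFlipRight := by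
  intro Board x y player _ hpre
  unfold Spec_checkFlipRight checkFlipRight checkFlipRight_alt
  have hvalid : ∀ i : Int, y + 1 ≤ i → i < 8 → (pvCell Board x i).isSome := by
    intro i hi1 hi2
    rcases hpre with hy | hrow
    · omega
    · cases hg : PySem.List.pyGet? Board x with
      | none => rw [hg] at hrow; simp [Option.any] at hrow
      | some row =>
        rw [hg] at hrow
        simp [Option.any] at hrow
        obtain ⟨hlen, hneg⟩ := hrow
        unfold pvCell
        rw [hg]
        simp only [Option.bind_some]
        rw [Option.isSome_iff_ne_none]
        intro hnone
        rw [PySem.List.pyGet?_eq_none_iff] at hnone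
        apply hnone
        unfold PySem.Raise.InRange
        omega
  obtain ⟨cells, hmap⟩ := mapM_isSome (fun i => pvCell Board x i)
      (PySem.List.pyRange (y + 1) 8 1)
      (fun i hi => by
        rw [PySem.List.mem_pyRange_one] at hi
        exact hvalid i hi.1 hi.2)
  rw [hmap]
  rw [loopA_eq_loopList Board x y player (y + 1) cells 0 hmap]
  rw [show y + 1 - (y + 1) = 0 from by omega]
  rw [loopList_live player cells 0 le_rfl]
  exact (alt_view player cells).symm
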